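-- pv_equiv track=rewrite | github.com/rnihesh/ihcj-test | download.py | extract_court_bench_from_path
-- ===== SOURCE A (Python) =====
-- def extract_court_bench_from_path(key):
--     """Extract court and bench from S3 key path"""
--     parts = key.split('/')
--     court_code = bench = None
--
--     for part in parts:
--         if part.startswith('court='):
--             court_code = part[6:]  # Remove 'court=' prefix
--         elif part.startswith('bench='):
--             bench = part[6:]  # Remove 'bench=' prefix
--
--     return court_code, bench
-- ===== SOURCE B (Python) =====
-- def extract_court_bench_from_path(key):
--     """Extract court and bench from S3 key path"""
--     d = {}
--     for p in key.split('/'):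
--         if '=' in p:
--             k, v = p.split('=', 1)
--             d[k] = v
--     return d.get('court'), d.get('bench')
-- ===== Notes on version B (the rewrite author's own statement) =====
-- stated objective: simpler
-- what changed: Replaces the per-part prefix-branching loop by building one key-to-value index over all segments containing a separator (last occurrence wins) followed by two constant dictionary lookups.
import Mathlib
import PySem

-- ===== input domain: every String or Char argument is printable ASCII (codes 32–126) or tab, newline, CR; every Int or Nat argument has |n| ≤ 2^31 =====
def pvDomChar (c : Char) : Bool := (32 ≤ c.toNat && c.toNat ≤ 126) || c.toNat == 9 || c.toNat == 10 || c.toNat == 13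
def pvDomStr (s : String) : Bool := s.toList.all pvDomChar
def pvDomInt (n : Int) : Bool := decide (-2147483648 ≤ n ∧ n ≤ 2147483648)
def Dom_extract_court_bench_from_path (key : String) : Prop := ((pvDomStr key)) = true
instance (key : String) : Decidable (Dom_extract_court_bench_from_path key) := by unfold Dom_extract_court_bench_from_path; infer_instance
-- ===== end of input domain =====

-- B replaces A's per-part prefix-branching loop by building one key=value index over all
-- '=' segments (last-wins dict) followed by two constant lookups; same result, simpler decomposition.

-- ===== PORT A =====
def extract_court_bench_from_path (key : String) : Option String × Option String :=
  let parts := (PySem.Str.split? key "/").getD []   -- key.split('/'); "/" ≠ "" so split? is always some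
  parts.foldl
    (fun (st : Option String × Option String) part =>
      if PySem.Str.startswith part "court=" then (some (PySem.Str.slice part (some 6) none), st.2)
      else if PySem.Str.startswith part "bench=" then (st.1, some (PySem.Str.slice part (some 6) none))
      else st)
    (none, none)

-- ===== PORT B =====
def extract_court_bench_from_path_alt (key : String) : Option String × Option String :=
  let d : PySem.Dict String String :=
    ((PySem.Str.split? key "/").getD []).foldl
      (fun d p =>
        if PySem.Str.isIn "=" p then
          match PySem.Str.splitMax? p "=" 1 with   -- k, v = p.split('=', 1): exactly two pieces since '=' in p
          | some [k, v] => d.insert k v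
          | _ => d
        else d)
      PySem.Dict.empty
  (d.get? "court", d.get? "bench")

-- ===== PRECONDITION & SPEC =====
def Spec_extract_court_bench_from_path (key : String) (out : Option String × Option String) : Prop := out = extract_court_bench_from_path_alt key
instance (key : String) (out : Option String × Option String) : Decidable (Spec_extract_court_bench_from_path key out) := by unfold Spec_extract_court_bench_from_path; infer_instance

-- ===== CLAIM (what is proved, stated in full; the proofs are below) =====
def Claim_equal_extract_court_bench_from_path : Prop := ∀ (key : String), Dom_extract_court_bench_from_path key → Spec_extract_court_bench_from_path key (extract_court_bench_from_path key)

-- ===== LEMMAS AND PROOFS =====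

-- the two loop bodies, named (definitionally the lambdas inside the ports)
def pvStepA (st : Option String × Option String) (part : String) : Option String × Option String :=
  if PySem.Str.startswith part "court=" then (some (PySem.Str.slice part (some 6) none), st.2)
  else if PySem.Str.startswith part "bench=" then (st.1, some (PySem.Str.slice part (some 6) none))
  else st

def pvStepB (d : PySem.Dict String String) (p : String) : PySem.Dict String String :=
  if PySem.Str.isIn "=" p then
    match PySem.Str.splitMax? p "=" 1 with
    | some [k, v] => d.insert k v
    | _ => d
  else d

lemma pv_isIn_eq (s : String) : PySem.Str.isIn "=" s = true ↔ '=' ∈ s.toList := by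
  rw [PySem.Str.isIn_iff_infix]
  constructor
  · intro h; exact h.mem (by simp)
  · intro h
    obtain ⟨u, t, he⟩ := List.append_of_mem h
    exact ⟨u, t, by simp [he]⟩

lemma pv_go_m0 (sep : List Char) (fuel : Nat) (l cur : List Char) (acc : List (List Char)) :
    PySem.Chars.splitOnMax.go sep fuel 0 l cur acc = ((cur.reverse ++ l) :: acc).reverse := by
  cases fuel with
  | zero => rfl
  | succ f => cases l with
    | nil => simp [PySem.Chars.splitOnMax.go]
    | cons c rest => simp [PySem.Chars.splitOnMax.go]

lemma pv_go_m1 (l : List Char) : ∀ (fuel : Nat) (cur : List Char) (acc : List (List Char)),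
    '=' ∈ l → l.length < fuel →
    PySem.Chars.splitOnMax.go ['='] fuel 1 l cur acc =
      acc.reverse ++ [cur.reverse ++ l.take (l.idxOf '='), l.drop (l.idxOf '=' + 1)] := by
  induction l with
  | nil => intro fuel cur acc hm _; simp at hm
  | cons c rest ih =>
    intro fuel cur acc hm hf
    cases fuel with
    | zero => omega
    | succ f =>
      simp only [List.length_cons] at hf
      by_cases hc : c = '='
      · subst hc
        have hpre : List.isPrefixOf ['='] ('=' :: rest) = true := by simp [List.isPrefixOf]
        simp only [PySem.Chars.splitOnMax.go, hpre, if_true, if_neg (by omega : ¬ (1 : Nat) = 0)]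
        rw [pv_go_m0]
        simp
      · have hpre : List.isPrefixOf ['='] (c :: rest) = false := by
          simp [List.isPrefixOf]; exact fun h => hc h.symm
        have hm' : '=' ∈ rest := by cases hm with
          | head => exact absurd rfl hc
          | tail _ h => exact h
        simp only [PySem.Chars.splitOnMax.go, hpre, if_neg (by omega : ¬ (1 : Nat) = 0), Bool.false_eq_true, if_false]
        rw [ih f (c :: cur) acc hm' (by omega)]
        have hcb : (c == '=') = false := by simp; exact hc
        simp [List.idxOf_cons, hcb]

lemma pv_splitOnMax_eq (cs : List Char) (h : '=' ∈ cs) :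
    PySem.Chars.splitOnMax cs ['='] 1 = [cs.take (cs.idxOf '='), cs.drop (cs.idxOf '=' + 1)] := by
  unfold PySem.Chars.splitOnMax
  rw [if_neg (by omega)]
  simp [pv_go_m1 cs (cs.length + 1) [] [] h (by omega)]

lemma pv_idxOf_append (pre rest : List Char) (hp : '=' ∉ pre) :
    (pre ++ '=' :: rest).idxOf '=' = pre.length := by
  induction pre with
  | nil => simp
  | cons c t ih =>
    simp only [List.mem_cons, not_or] at hp
    have hc : (c == '=') = false := by simpa [beq_iff_eq] using fun h => hp.1 h.symm
    simp only [List.cons_append, List.idxOf_cons, List.length_cons, hc, cond_false, ih hp.2]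

lemma pv_decomp (cs : List Char) (hm : '=' ∈ cs) :
    cs = cs.take (cs.idxOf '=') ++ '=' :: cs.drop (cs.idxOf '=' + 1) := by
  have hlt : cs.idxOf '=' < cs.length := List.idxOf_lt_length_of_mem hm
  conv_lhs => rw [← List.take_append_drop (cs.idxOf '=') cs, ← List.getElem_cons_drop hlt,
    List.getElem_idxOf hlt]

-- startswith (pre ++ "=") holds exactly when the piece before the first '=' is pre
lemma pv_startswith_iff (cs pre : List Char) (hm : '=' ∈ cs) (hp : '=' ∉ pre) :
    PySem.Chars.startswith cs (pre ++ ['=']) = true ↔ cs.take (cs.idxOf '=') = pre := by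
  constructor
  · intro h
    rw [PySem.Chars.startswith_iff] at h
    obtain ⟨rest, rfl⟩ := h
    rw [List.append_assoc] at *
    simp only [List.singleton_append] at *
    rw [pv_idxOf_append pre rest hp]
    exact List.take_left' rfl
  · intro h
    rw [PySem.Chars.startswith_iff]
    have hlt : cs.idxOf '=' < cs.length := List.idxOf_lt_length_of_mem hm
    have hdec : cs.take (cs.idxOf '=') ++ cs[cs.idxOf '='] :: cs.drop (cs.idxOf '=' + 1) = cs := by
      rw [List.getElem_cons_drop, List.take_append_drop]
    rw [List.getElem_idxOf hlt] at hdec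
    refine ⟨cs.drop (cs.idxOf '=' + 1), ?_⟩
    calc (pre ++ ['=']) ++ cs.drop (cs.idxOf '=' + 1)
        = pre ++ '=' :: cs.drop (cs.idxOf '=' + 1) := by simp
      _ = cs := by rw [← h]; exact hdec

lemma pv_startswith_mem (p : String) (pre : List Char)
    (h : PySem.Str.startswith p (String.ofList (pre ++ ['='])) = true) : '=' ∈ p.toList := by
  rw [PySem.Str.startswith] at h
  simp only [String.toList_ofList] at h
  rw [PySem.Chars.startswith_iff] at h
  exact h.mem (by simp)

-- one loop step preserves the invariant "dict lookups = A's pair"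
lemma pv_step (p : String) (d : PySem.Dict String String) (c b : Option String)
    (hc : d.get? "court" = c) (hb : d.get? "bench" = b) :
    pvStepA (c, b) p = ((pvStepB d p).get? "court", (pvStepB d p).get? "bench") := by
  by_cases hin : PySem.Str.isIn "=" p = true
  · have hm : '=' ∈ p.toList := (pv_isIn_eq p).1 hin
    have hsplit : PySem.Str.splitMax? p "=" 1 =
        some [String.ofList (p.toList.take (p.toList.idxOf '=')),
              String.ofList (p.toList.drop (p.toList.idxOf '=' + 1))] := by
      simp [PySem.Str.splitMax?, PySem.Chars.splitMax?,
        show ("=".toList : List Char) = ['='] from rfl, pv_splitOnMax_eq p.toList hm]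
    set i := p.toList.idxOf '=' with hi
    set k := p.toList.take i with hk
    set v := p.toList.drop (i + 1) with hv
    have hstepB : pvStepB d p = d.insert (String.ofList k) (String.ofList v) := by
      simp only [pvStepB, hin, if_true, hsplit]
    have hcourt : PySem.Str.startswith p "court=" = true ↔ k = "court".toList := by
      rw [PySem.Str.startswith, show ("court=".toList : List Char) = "court".toList ++ ['='] from rfl]
      exact pv_startswith_iff p.toList "court".toList hm (by decide)
    have hbench : PySem.Str.startswith p "bench=" = true ↔ k = "bench".toList := by
      rw [PySem.Str.startswith, show ("bench=".toList : List Char) = "bench".toList ++ ['='] from rfl]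
      exact pv_startswith_iff p.toList "bench".toList hm (by decide)
    have hslice : PySem.Str.slice p (some 6) none = String.ofList (p.toList.drop 6) := by
      simp [PySem.Str.slice, PySem.List.slice_from p.toList (by omega : (0:Int) ≤ 6)]
    rw [hstepB]
    by_cases hkc : k = "court".toList
    · have hdrop : p.toList.drop 6 = v := by
        conv_lhs => rw [pv_decomp p.toList hm, ← hi, ← hk, ← hv, hkc]
        rfl
      have hck : String.ofList k = "court" := by rw [hkc]; rfl
      have hA : pvStepA (c, b) p = (some (String.ofList v), b) := by
        simp only [pvStepA, hcourt.2 hkc, if_true, hslice, hdrop]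
      rw [hA, hck, PySem.Dict.get?_insert_self,
        PySem.Dict.get?_insert_of_ne d (String.ofList v) (by decide : ("bench":String) ≠ "court"), hb]
    · by_cases hkb : k = "bench".toList
      · have hdrop : p.toList.drop 6 = v := by
          conv_lhs => rw [pv_decomp p.toList hm, ← hi, ← hk, ← hv, hkb]
          rfl
        have hbk : String.ofList k = "bench" := by rw [hkb]; rfl
        have hnc : PySem.Str.startswith p "court=" = false := by
          rw [Bool.eq_false_iff, Ne, hcourt]; rw [hkb]; decide
        have hA : pvStepA (c, b) p = (c, some (String.ofList v)) := by
          simp only [pvStepA, hnc, Bool.false_eq_true, if_false, hbench.2 hkb, if_true, hslice, hdrop]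
        rw [hA, hbk, PySem.Dict.get?_insert_self,
          PySem.Dict.get?_insert_of_ne d (String.ofList v) (by decide : ("court":String) ≠ "bench"), hc]
      · have hnc : PySem.Str.startswith p "court=" = false := by
          rw [Bool.eq_false_iff, Ne, hcourt]; exact hkc
        have hnb : PySem.Str.startswith p "bench=" = false := by
          rw [Bool.eq_false_iff, Ne, hbench]; exact hkb
        have hkc' : ("court" : String) ≠ String.ofList k := by
          intro h; exact hkc (by rw [← String.toList_ofList (l := k), ← h])
        have hkb' : ("bench" : String) ≠ String.ofList k := by
          intro h; exact hkb (by rw [← String.toList_ofList (l := k), ← h])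
        have hA : pvStepA (c, b) p = (c, b) := by
          simp only [pvStepA, hnc, hnb, Bool.false_eq_true, if_false]
        rw [hA, PySem.Dict.get?_insert_of_ne d (String.ofList v) hkc',
          PySem.Dict.get?_insert_of_ne d (String.ofList v) hkb', hc, hb]
  · have hnm : '=' ∉ p.toList := fun h => hin ((pv_isIn_eq p).2 h)
    have hnc : PySem.Str.startswith p "court=" = false := by
      rw [Bool.eq_false_iff, Ne]
      intro h; exact hnm (pv_startswith_mem p "court".toList (by rwa [show String.ofList ("court".toList ++ ['=']) = "court=" from rfl]))
    have hnb : PySem.Str.startswith p "bench=" = false := by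
      rw [Bool.eq_false_iff, Ne]
      intro h; exact hnm (pv_startswith_mem p "bench".toList (by rwa [show String.ofList ("bench".toList ++ ['=']) = "bench=" from rfl]))
    have hin' : PySem.Str.isIn "=" p = false := Bool.eq_false_iff.2 hin
    have hA : pvStepA (c, b) p = (c, b) := by
      simp only [pvStepA, hnc, hnb, Bool.false_eq_true, if_false]
    have hB : pvStepB d p = d := by
      simp only [pvStepB, hin', Bool.false_eq_true, if_false]
    rw [hA, hB, hc, hb]

lemma pv_fold (parts : List String) : ∀ (d : PySem.Dict String String) (c b : Option String),
    d.get? "court" = c → d.get? "bench" = b →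
    parts.foldl pvStepA (c, b) =
      ((parts.foldl pvStepB d).get? "court", (parts.foldl pvStepB d).get? "bench") := by
  induction parts with
  | nil => intro d c b hc hb; simp [← hc, ← hb]
  | cons p t ih =>
    intro d c b hc hb
    simp only [List.foldl_cons]
    rw [pv_step p d c b hc hb]
    exact ih (pvStepB d p) _ _ rfl rfl

-- ===== VERDICT (by name: the statement is the Claim_ definition above) =====
theorem extract_court_bench_from_path_spec : Claim_equal_extract_court_bench_from_path := by
  intro key _
  unfold Spec_extract_court_bench_from_path extract_court_bench_from_path extract_court_bench_from_path_alt
  exact pv_fold _ PySem.Dict.empty none none rfl rfl
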